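-- pv_equiv track=rewrite | github.com/LKhushlani/leetcode | googleOnlineCodingChallenge/maxDistance.py | find_max_distance
-- ===== SOURCE A (Python) =====
-- class TreeNode:
--     def __init__(self, marked = False):
--         self.marked = marked
--         self.left = None
--         self.right = None
--
-- def find_max_distance(input_arr):
--
--     def createTree(input_arr):
--         root = TreeNode()
--         for st in input_arr:
--             node = root
--             L = len(st)
--             for i in range(L):
--                 if st[i] == '0':
--                     if not node.left:
--                         node.left = TreeNode()
--                     node = node.left
--                 else:
--                     if not node.right:
--                         node.right = TreeNode()
--                     node = node.right
--             node.marked = True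
--         return root
--
--     root = createTree(input_arr)
--
--     # Returns a tuple a,b:
--     # a - max_sum encountered in that subtree
--     # b - height of the sub-tree
--     def get_max_distance(node):
--         if not node:
--             return 0, 0
--
--         left_max_sum, left_height = get_max_distance(node.left)
--         right_max_sum, right_height = get_max_distance(node.right)
--
--         max_sum = max(left_max_sum, right_max_sum)
--         if node.marked or (node.left and node.right):
--             max_sum = max(left_height + right_height, max_sum)
--
--         current_height = max(left_height, right_height) + 1
--
--         return max_sum, current_height
--
--     return get_max_distance(root)[0]
-- ===== SOURCE B (Python) =====
-- def find_max_distance(input_arr):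
--     # Recurse on prefix-partitioned string lists directly; no trie objects are built.
--     def solve(strs):
--         marked = "" in strs
--         left = [s[1:] for s in strs if s and s[0] == '0']
--         right = [s[1:] for s in strs if s and s[0] != '0']
--         lm, lh = solve(left) if left else (0, 0)
--         rm, rh = solve(right) if right else (0, 0)
--         ms = max(lm, rm)
--         if marked or (left and right):
--             ms = max(lh + rh, ms)
--         return ms, max(lh, rh) + 1
--     return solve(input_arr)[0]
-- ===== Notes on version B (the rewrite author's own statement) =====
-- stated objective: alternative
-- what changed: B never builds a trie of node objects: it recurses directly on the list of strings, partitioning by first character ('0' vs other) and stripping it, computing (max_sum, height) on the way up.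
import Mathlib
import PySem

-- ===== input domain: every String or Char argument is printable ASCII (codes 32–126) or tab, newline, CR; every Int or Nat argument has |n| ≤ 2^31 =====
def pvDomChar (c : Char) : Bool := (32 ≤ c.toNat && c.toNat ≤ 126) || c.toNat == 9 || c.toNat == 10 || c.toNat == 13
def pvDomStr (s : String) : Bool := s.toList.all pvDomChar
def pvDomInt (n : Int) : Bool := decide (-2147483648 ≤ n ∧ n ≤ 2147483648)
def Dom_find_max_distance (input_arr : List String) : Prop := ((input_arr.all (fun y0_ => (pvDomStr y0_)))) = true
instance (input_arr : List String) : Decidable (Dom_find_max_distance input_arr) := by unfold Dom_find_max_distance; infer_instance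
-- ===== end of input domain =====

-- B never builds a trie: it recurses on the list of strings directly (alternative decomposition).

-- ===== PORT A =====
-- Python's TreeNode graph: nil models None, node m l r models a TreeNode with marked m.
inductive PvTrie
  | nil
  | node (marked : Bool) (left right : PvTrie)
deriving DecidableEq, Repr

-- the inner per-string walk of createTree (mutating walk transcribed as structural recursion)
def pvInsertA : PvTrie → List Char → PvTrie
  | .nil, _ => .nil   -- unreachable: the walk always stands on a TreeNode
  | .node _ l r, [] => .node true l r
  | .node m l r, c :: cs =>
    if c = '0' then
      .node m (pvInsertA (match l with | .nil => PvTrie.node false .nil .nil | x => x) cs) r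
    else
      .node m l (pvInsertA (match r with | .nil => PvTrie.node false .nil .nil | x => x) cs)

def pvGetMaxA : PvTrie → Int × Int
  | .nil => (0, 0)
  | .node m l r =>
    let lp := pvGetMaxA l
    let rp := pvGetMaxA r
    let ms := max lp.1 rp.1
    let ms := if m || (decide (l ≠ PvTrie.nil) && decide (r ≠ PvTrie.nil)) then max (lp.2 + rp.2) ms else ms
    (ms, max lp.2 rp.2 + 1)

def find_max_distance (input_arr : List String) : Int :=
  (pvGetMaxA (input_arr.foldl (fun t s => pvInsertA t s.toList) (.node false .nil .nil))).1

-- ===== PORT B =====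
-- [s[1:] for s in strs if s and s[0] == '0']
def pvLeftOf (strs : List (List Char)) : List (List Char) :=
  strs.filterMap fun s => match s with
    | c :: rest => if c = '0' then some rest else none
    | [] => none

-- [s[1:] for s in strs if s and s[0] != '0']
def pvRightOf (strs : List (List Char)) : List (List Char) :=
  strs.filterMap fun s => match s with
    | c :: rest => if c = '0' then none else some rest
    | [] => none

def pvLenSum (strs : List (List Char)) : Nat := (strs.map List.length).sum

lemma pvLeftOf_sum (strs : List (List Char)) :
    pvLenSum (pvLeftOf strs) + (pvLeftOf strs).length ≤ pvLenSum strs := by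
  induction strs with
  | nil => simp [pvLeftOf, pvLenSum]
  | cons s t ih =>
    cases s with
    | nil => simpa [pvLeftOf, pvLenSum] using ih
    | cons c rest =>
      by_cases h : c = '0' <;>
        simp [pvLeftOf, pvLenSum, h] at ih ⊢ <;> omega

lemma pvRightOf_sum (strs : List (List Char)) :
    pvLenSum (pvRightOf strs) + (pvRightOf strs).length ≤ pvLenSum strs := by
  induction strs with
  | nil => simp [pvRightOf, pvLenSum]
  | cons s t ih =>
    cases s with
    | nil => simpa [pvRightOf, pvLenSum] using ih
    | cons c rest =>
      by_cases h : c = '0' <;>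
        simp [pvRightOf, pvLenSum, h] at ih ⊢ <;> omega

lemma pvLeftOf_lt (strs : List (List Char)) (h : pvLeftOf strs ≠ []) :
    pvLenSum (pvLeftOf strs) < pvLenSum strs := by
  have := pvLeftOf_sum strs
  have : 0 < (pvLeftOf strs).length := List.length_pos_iff.mpr h
  have := pvLeftOf_sum strs
  omega

lemma pvRightOf_lt (strs : List (List Char)) (h : pvRightOf strs ≠ []) :
    pvLenSum (pvRightOf strs) < pvLenSum strs := by
  have h1 := pvRightOf_sum strs
  have h2 : 0 < (pvRightOf strs).length := List.length_pos_iff.mpr h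
  omega

def pvSolveB (strs : List (List Char)) : Int × Int :=
  let L := pvLeftOf strs
  let R := pvRightOf strs
  let lp := if _h : L = [] then ((0 : Int), (0 : Int)) else pvSolveB L
  let rp := if _h : R = [] then ((0 : Int), (0 : Int)) else pvSolveB R
  let ms := max lp.1 rp.1
  let ms := if strs.contains [] || (!L.isEmpty && !R.isEmpty) then max (lp.2 + rp.2) ms else ms
  (ms, max lp.2 rp.2 + 1)
termination_by pvLenSum strs
decreasing_by
  · exact pvLeftOf_lt _ _h
  · exact pvRightOf_lt _ _h

def find_max_distance_alt (input_arr : List String) : Int :=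
  (pvSolveB (input_arr.map String.toList)).1

-- ===== PRECONDITION & SPEC =====
def Spec_find_max_distance (input_arr : List String) (out : Int) : Prop := out = find_max_distance_alt input_arr
instance (input_arr : List String) (out : Int) : Decidable (Spec_find_max_distance input_arr out) := by unfold Spec_find_max_distance; infer_instance

-- ===== CLAIM (what is proved, stated in full; the proofs are below) =====
def Claim_equal_find_max_distance : Prop := ∀ (input_arr : List String), Dom_find_max_distance input_arr → Spec_find_max_distance input_arr (find_max_distance input_arr)

-- ===== LEMMAS AND PROOFS =====

-- canonical trie of a list of strings (proof device bridging the two ports)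
def pvBuild (strs : List (List Char)) : PvTrie :=
  .node (strs.contains [])
    (if _h : pvLeftOf strs = [] then .nil else pvBuild (pvLeftOf strs))
    (if _h : pvRightOf strs = [] then .nil else pvBuild (pvRightOf strs))
termination_by pvLenSum strs
decreasing_by
  · exact pvLeftOf_lt _ _h
  · exact pvRightOf_lt _ _h

lemma pvBuild_nil : pvBuild [] = .node false .nil .nil := by
  rw [pvBuild]; simp [pvLeftOf, pvRightOf]

lemma pvLeftOf_append (strs : List (List Char)) (cs : List Char) :
    pvLeftOf (strs ++ [cs]) =
      pvLeftOf strs ++ (match cs with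
        | c :: rest => if c = '0' then [rest] else []
        | [] => []) := by
  cases cs with
  | nil => simp [pvLeftOf]
  | cons c rest => by_cases h : c = '0' <;> simp [pvLeftOf, h]

lemma pvRightOf_append (strs : List (List Char)) (cs : List Char) :
    pvRightOf (strs ++ [cs]) =
      pvRightOf strs ++ (match cs with
        | c :: rest => if c = '0' then [] else [rest]
        | [] => []) := by
  cases cs with
  | nil => simp [pvRightOf]
  | cons c rest => by_cases h : c = '0' <;> simp [pvRightOf, h]

lemma pvBuild_eq (strs : List (List Char)) :
    pvBuild strs = .node (strs.contains [])
      (if pvLeftOf strs = [] then .nil else pvBuild (pvLeftOf strs))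
      (if pvRightOf strs = [] then .nil else pvBuild (pvRightOf strs)) := by
  rw [pvBuild]; simp

lemma pvBuild_ne_nil (strs : List (List Char)) : pvBuild strs ≠ .nil := by
  rw [pvBuild_eq]; simp

lemma pv_child_step (rest : List Char) (L : List (List Char))
    (ih : ∀ strs, pvInsertA (pvBuild strs) rest = pvBuild (strs ++ [rest])) :
    pvInsertA (match (if L = [] then PvTrie.nil else pvBuild L) with
      | PvTrie.nil => PvTrie.node false PvTrie.nil PvTrie.nil | x => x) rest
    = pvBuild (L ++ [rest]) := by
  by_cases h : L = []
  · rw [if_pos h]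
    show pvInsertA (PvTrie.node false PvTrie.nil PvTrie.nil) rest = _
    rw [← pvBuild_nil, ih [], h]
  · rw [if_neg h]
    obtain ⟨m, l, r, hb⟩ : ∃ m l r, pvBuild L = PvTrie.node m l r := by
      rw [pvBuild_eq]; exact ⟨_, _, _, rfl⟩
    rw [hb]
    show pvInsertA (PvTrie.node m l r) rest = _
    rw [← hb, ih L]

lemma pvInsert_build (cs : List Char) :
    ∀ strs, pvInsertA (pvBuild strs) cs = pvBuild (strs ++ [cs]) := by
  induction cs with
  | nil =>
    intro strs
    rw [pvBuild_eq strs, pvBuild_eq (strs ++ [[]])]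
    simp [pvInsertA, pvLeftOf_append, pvRightOf_append]
  | cons c rest ih =>
    intro strs
    rw [pvBuild_eq strs]
    by_cases hc : c = '0'
    · have hL : pvLeftOf (strs ++ [c :: rest]) = pvLeftOf strs ++ [rest] := by
        simp [pvLeftOf_append, hc]
      have hR : pvRightOf (strs ++ [c :: rest]) = pvRightOf strs := by
        simp [pvRightOf_append, hc]
      have hmark : (strs ++ [c :: rest]).contains ([] : List Char) = strs.contains [] := by simp
      simp only [pvInsertA, if_pos hc]
      rw [pv_child_step rest (pvLeftOf strs) ih,
        pvBuild_eq (strs ++ [c :: rest]), hL, hR, hmark,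
        if_neg (by simp : pvLeftOf strs ++ [rest] ≠ [])]
    · have hL : pvLeftOf (strs ++ [c :: rest]) = pvLeftOf strs := by
        simp [pvLeftOf_append, hc]
      have hR : pvRightOf (strs ++ [c :: rest]) = pvRightOf strs ++ [rest] := by
        simp [pvRightOf_append, hc]
      have hmark : (strs ++ [c :: rest]).contains ([] : List Char) = strs.contains [] := by simp
      simp only [pvInsertA, if_neg hc]
      rw [pv_child_step rest (pvRightOf strs) ih,
        pvBuild_eq (strs ++ [c :: rest]), hL, hR, hmark,
        if_neg (by simp : pvRightOf strs ++ [rest] ≠ [])]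

lemma pvFoldl_build :
    ∀ (l : List (List Char)) (strs : List (List Char)),
      l.foldl pvInsertA (pvBuild strs) = pvBuild (strs ++ l) := by
  intro l
  induction l with
  | nil => intro strs; simp
  | cons cs t ih =>
    intro strs
    have : (strs ++ cs :: t) = (strs ++ [cs]) ++ t := by simp
    rw [this, List.foldl_cons, pvInsert_build, ih]

lemma pvGetMax_build (strs : List (List Char)) :
    pvGetMaxA (pvBuild strs) = pvSolveB strs := by
  induction strs using pvBuild.induct with
  | _ strs ihl ihr =>
    rw [pvBuild_eq strs, pvSolveB]
    by_cases hL : pvLeftOf strs = [] <;> by_cases hR : pvRightOf strs = [] <;>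
      simp [pvGetMaxA, hL, hR, ihl, ihr, pvBuild_ne_nil]

-- ===== VERDICT (by name: the statement is the Claim_ definition above) =====
theorem find_max_distance_spec : Claim_equal_find_max_distance := by
  intro input_arr _
  unfold Spec_find_max_distance find_max_distance find_max_distance_alt
  have h1 : input_arr.foldl (fun t s => pvInsertA t s.toList) (.node false .nil .nil)
      = (input_arr.map String.toList).foldl pvInsertA (pvBuild []) := by
    rw [pvBuild_nil, List.foldl_map]
  rw [h1, pvFoldl_build, List.nil_append, pvGetMax_build]
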